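-- pv_equiv track=rewrite | github.com/wekesa/python_practise | algorithms/palindrome.py | max_gap
-- ===== SOURCE A (Python) =====
-- def max_gap(x):
--     max_gap_length = 0
--     current_gap_length = 0
--     for i in range(x.bit_length()):
--         if x & (1 << i):
--             # Set, any gap is over.
--             if current_gap_length > max_gap_length:
--                 max_gap_length = current_gap_length
--             current_gap_length = 0
--         else:
--             # Not set, the gap widens.
--             current_gap_length += 1
--     # Gap might end at the end.
--     if current_gap_length > max_gap_length:
--         max_gap_length = current_gap_length
--     return max_gap_length
-- ===== SOURCE B (Python) =====
-- def max_gap(x):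
--     n = x.bit_length()
--     if n == 0:
--         return 0
--     s = format(x & ((1 << n) - 1), '0{}b'.format(n))
--     return max(len(run) for run in s.split('1'))
-- ===== Notes on version B (the rewrite author's own statement) =====
-- stated objective: alternative
-- what changed: A's bit-by-bit loop with a running gap counter is replaced by formatting the n-bit two's-complement window as a zero-padded binary string and taking the longest piece of its split on '1'.
import Mathlib
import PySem

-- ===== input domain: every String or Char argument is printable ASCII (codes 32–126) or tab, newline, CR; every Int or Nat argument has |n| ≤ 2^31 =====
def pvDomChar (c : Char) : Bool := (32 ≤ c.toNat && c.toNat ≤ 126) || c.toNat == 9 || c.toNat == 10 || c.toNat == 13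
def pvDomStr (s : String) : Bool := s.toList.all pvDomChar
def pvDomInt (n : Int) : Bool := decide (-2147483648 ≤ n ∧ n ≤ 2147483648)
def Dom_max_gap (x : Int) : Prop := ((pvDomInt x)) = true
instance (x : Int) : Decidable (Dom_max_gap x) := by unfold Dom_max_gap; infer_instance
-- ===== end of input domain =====

-- B replaces A's bit-by-bit running-counter scan by formatting the n-bit two's-complement
-- window as a binary string and taking the longest piece of its split on '1' (alternative).

-- ===== PORT A =====
def max_gap (x : Int) : Int :=
  let r := (PySem.List.pyRange 0 (PySem.Int.bitLength x : Int)).foldl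
    (fun (s : Int × Int) (i : Int) =>
      if PySem.Int.band x ((1 : Int) <<< i.toNat) ≠ 0 then
        -- set: the gap is over
        (if s.2 > s.1 then s.2 else s.1, 0)
      else
        -- not set: the gap widens
        (s.1, s.2 + 1))
    (0, 0)
  -- the gap might end at the end
  if r.2 > r.1 then r.2 else r.1

-- ===== PORT B =====
def max_gap_alt (x : Int) : Int :=
  let n := PySem.Int.bitLength x
  if n = 0 then 0
  else
    let v := PySem.Int.band x ((1 : Int) <<< n - 1)
    -- format(v, '0{}b'.format(n)): PySem.Int.toBinChars is format(v, 'b'); the '0…' width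
    -- directive zero-pads it on the left to width n (exact here since 0 ≤ v < 2^n)
    let s : List Char := List.replicate (n - (PySem.Int.toBinChars v).length) '0' ++ PySem.Int.toBinChars v
    let runs := PySem.Chars.splitOn s ['1']
    -- max(len(run) for run in …): split always yields at least one piece, so none is unreachable
    match PySem.List.max? (runs.map (fun r => (r.length : Int))) (fun y => y) with
    | some m => m
    | none => 0

-- ===== PRECONDITION & SPEC =====
def Spec_max_gap (x : Int) (out : Int) : Prop := out = max_gap_alt x
instance (x : Int) (out : Int) : Decidable (Spec_max_gap x out) := by unfold Spec_max_gap; infer_instance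

-- ===== CLAIM (what is proved, stated in full; the proofs are below) =====
def Claim_equal_max_gap : Prop := ∀ (x : Int), Dom_max_gap x → Spec_max_gap x (max_gap x)

-- ===== LEMMAS AND PROOFS =====

-- binary digits of m, most significant first, as Nat.toDigits 2 produces them
def binMSB (m : Nat) : List Char :=
  if m < 2 then [Nat.digitChar m] else binMSB (m / 2) ++ [Nat.digitChar (m % 2)]
decreasing_by exact Nat.div_lt_self (by omega) (by omega)

-- the low n bits of m, least significant first
def padChars (n m : Nat) : List Char :=
  match n with
  | 0 => []
  | n + 1 => (if m % 2 = 1 then '1' else '0') :: padChars n (m / 2)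

-- split on the single character '1' (the shape PySem.Chars.splitOn takes for sep = ['1'])
def split1 (l : List Char) : List (List Char) :=
  match l with
  | [] => [[]]
  | c :: r => if c = '1' then [] :: split1 r else (split1 r).modifyHead (c :: ·)

def lens (l : List Char) : List Int := (split1 l).map (fun r => (r.length : Int))

-- the value of the n-bit two's-complement window of x
def vN (x : Int) : Nat :=
  if 0 ≤ x then x.toNat else 2 ^ PySem.Int.bitLength x - x.natAbs

-- the body of A's loop, on the characters of the binary string
def stepC (s : Int × Int) (c : Char) : Int × Int :=
  if c = '1' then (if s.2 > s.1 then s.2 else s.1, 0) else (s.1, s.2 + 1)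

lemma toDigitsCore_eq (f : Nat) : ∀ (m : Nat) (acc : List Char), m < f →
    Nat.toDigitsCore 2 f m acc = binMSB m ++ acc := by
  induction f with
  | zero => omega
  | succ f ih =>
    intro m acc hm
    rw [Nat.toDigitsCore]
    by_cases h2 : m < 2
    · have h0 : m / 2 = 0 := by omega
      rw [binMSB]
      simp [h0, h2, Nat.mod_eq_of_lt h2]
    · have hne : ¬ m / 2 = 0 := by omega
      rw [if_neg hne, ih (m / 2) _ (by omega)]
      conv_rhs => rw [binMSB]
      rw [if_neg h2, List.append_assoc]
      rfl

lemma toDigits_eq (m : Nat) : Nat.toDigits 2 m = binMSB m := by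
  have := toDigitsCore_eq (m + 1) m [] (by omega)
  simpa [Nat.toDigits] using this

lemma digitChar_mod2 (m : Nat) : Nat.digitChar (m % 2) = if m % 2 = 1 then '1' else '0' := by
  rcases Nat.mod_two_eq_zero_or_one m with h | h <;> simp [h, Nat.digitChar]

lemma padChars_zero_val (k : Nat) : padChars k 0 = List.replicate k '0' := by
  induction k with
  | zero => rfl
  | succ k ih => simp [padChars, ih, List.replicate_succ]

lemma pad_binMSB : ∀ (n m : Nat), m < 2 ^ n → 1 ≤ n →
    List.replicate (n - (binMSB m).length) '0' ++ binMSB m = (padChars n m).reverse := by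
  intro n
  induction n with
  | zero => omega
  | succ n ih =>
    intro m hm _
    by_cases h2 : m < 2
    · have hdig : binMSB m = [if m % 2 = 1 then '1' else '0'] := by
        rw [binMSB, if_pos h2]
        interval_cases m <;> decide
      have hdiv : m / 2 = 0 := by omega
      rw [hdig]
      simp [padChars, hdiv, padChars_zero_val]
    · have hn1 : 1 ≤ n := by
        have : (2:Nat) ^ 1 = 2 := rfl
        by_contra h
        have hn0 : n = 0 := by omega
        rw [hn0] at hm
        simp at hm
        omega
      have hstep : binMSB m = binMSB (m / 2) ++ [Nat.digitChar (m % 2)] := by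
        rw [binMSB, if_neg h2]
      have hlen : (binMSB m).length = (binMSB (m / 2)).length + 1 := by
        rw [hstep]; simp
      have hrec := ih (m / 2) (by omega) hn1
      have heq : n + 1 - ((binMSB (m / 2)).length + 1) = n - (binMSB (m / 2)).length := by omega
      rw [hlen, heq, hstep, ← List.append_assoc, hrec]
      simp [padChars, digitChar_mod2]

lemma padChars_eq_map (n : Nat) : ∀ m, padChars n m =
    (List.range n).map (fun i => if m.testBit i then '1' else '0') := by
  induction n with
  | zero => intro m; rfl
  | succ n ih =>
    intro m
    rw [List.range_succ_eq_map]
    simp only [padChars, List.map_cons, List.map_map, ih (m / 2)]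
    congr 1
    · rcases Nat.mod_two_eq_zero_or_one m with h | h <;> simp [Nat.testBit_zero, h]
    · apply List.map_congr_left
      intro i _
      simp [Function.comp, Nat.testBit_succ]

lemma split1_ne_nil : ∀ l, split1 l ≠ [] := by
  intro l
  induction l with
  | nil => simp [split1]
  | cons c r ih =>
    rw [split1]
    split_ifs
    · simp
    · cases h : split1 r with
      | nil => exact absurd h ih
      | cons a t => simp [List.modifyHead]

lemma go_eq (fuel : Nat) : ∀ (l cur : List Char) (acc : List (List Char)), l.length < fuel →
    PySem.Chars.splitOn.go ['1'] fuel l cur acc =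
      acc.reverse ++ (split1 l).modifyHead (cur.reverse ++ ·) := by
  induction fuel with
  | zero => intro l _ _ h; simp at h
  | succ fuel ih =>
    intro l cur acc hl
    cases l with
    | nil => simp [PySem.Chars.splitOn.go, split1, List.modifyHead]
    | cons c rest =>
      by_cases hc : c = '1'
      · subst hc
        rw [PySem.Chars.splitOn.go]
        have hrec := ih rest [] (cur.reverse :: acc) (by simp at hl; omega)
        simp [List.isPrefixOf, hrec, split1]
        cases hsp : split1 rest <;> simp
      · rw [PySem.Chars.splitOn.go]
        have hpre : (['1'] : List Char).isPrefixOf (c :: rest) = false := by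
          simp [List.isPrefixOf]
          intro h; exact absurd h.symm hc
        rw [hpre]
        simp only [Bool.false_eq_true, if_false]
        rw [ih rest (c :: cur) acc (by simpa using hl)]
        rw [split1, if_neg hc]
        cases h : split1 rest with
        | nil => exact absurd h (split1_ne_nil rest)
        | cons a t => simp [List.modifyHead]

lemma splitOn_eq (l : List Char) : PySem.Chars.splitOn l ['1'] = split1 l := by
  have := go_eq (l.length + 1) l [] [] (by omega)
  cases h : split1 l with
  | nil => exact absurd h (split1_ne_nil l)
  | cons a t =>
    rw [PySem.Chars.splitOn, this, h]
    simp [List.modifyHead]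

lemma foldl_max_max (l : List Int) : ∀ a b, List.foldl max (max a b) l = max a (List.foldl max b l) := by
  induction l with
  | nil => intro a b; rfl
  | cons x t ih =>
    intro a b
    simp only [List.foldl_cons, max_assoc, ih]

lemma if_gt_eq_max (a b : Int) : (if b > a then b else a) = max a b := by
  rw [max_def]
  split_ifs <;> omega

-- the running-counter fold over the reversed string, characterised by the split of the string
lemma fold_invariant (cs : List Char) :
    List.foldl stepC (0, 0) cs.reverse =
      (List.foldl max 0 ((lens cs).drop 1), (lens cs).headD 0) := by
  induction cs with
  | nil => simp [lens, split1]
  | cons c t ih =>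
    rw [List.reverse_cons, List.foldl_append, ih]
    obtain ⟨a, r, h⟩ : ∃ a r, split1 t = a :: r := by
      cases h : split1 t with
      | nil => exact absurd h (split1_ne_nil t)
      | cons a r => exact ⟨a, r, rfl⟩
    have hl : lens t = (a.length : Int) :: r.map (fun q => (q.length : Int)) := by
      simp [lens, h]
    by_cases hc : c = '1'
    · subst hc
      have hlens : lens ('1' :: t) = 0 :: lens t := by simp [lens, split1]
      rw [hlens, hl]
      simp only [List.foldl_cons, List.foldl_nil, stepC, if_pos, List.drop_one,
        List.tail_cons, List.headD_cons, if_gt_eq_max]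
      rw [show max (0 : Int) ((a.length : Int)) = max ((a.length : Int)) 0
        from max_comm _ _, foldl_max_max, max_comm]
    · have hlens : lens (c :: t) = ((a.length : Int) + 1) :: r.map (fun q => (q.length : Int)) := by
        simp [lens, split1, if_neg hc, h, List.modifyHead]
      rw [hlens, hl]
      simp [stepC, if_neg hc]

-- ---- bit-level facts ----

lemma one_shiftLeft (n : Nat) : (1 : Int) <<< n = ((2 ^ n : Nat) : Int) := by
  simp [Int.shiftLeft_eq]

lemma bitLength_pos (x : Int) (hx : x ≠ 0) : 1 ≤ PySem.Int.bitLength x := by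
  have h1 : 1 ≤ x.natAbs := by omega
  have h2 := PySem.Int.lt_two_pow_bitLength x
  by_contra h
  have h0 : PySem.Int.bitLength x = 0 := by omega
  rw [h0] at h2
  simp at h2
  omega

lemma vN_lt (x : Int) (hx : x ≠ 0) : vN x < 2 ^ PySem.Int.bitLength x := by
  have h2 := PySem.Int.lt_two_pow_bitLength x
  have h1 : 1 ≤ x.natAbs := by omega
  have hpos : 0 < 2 ^ PySem.Int.bitLength x := Nat.two_pow_pos _
  unfold vN
  split_ifs with h
  · have : x.toNat = x.natAbs := by omega
    omega
  · omega

lemma mask_cast (n : Nat) : (1 : Int) <<< n - 1 = ((2 ^ n - 1 : Nat) : Int) := by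
  rw [one_shiftLeft]
  have : 1 ≤ 2 ^ n := Nat.one_le_two_pow
  push_cast [this]
  ring

lemma band_mask (x : Int) (_hx : x ≠ 0) :
    PySem.Int.band x ((1 : Int) <<< PySem.Int.bitLength x - 1) = ((vN x : Nat) : Int) := by
  have hlt := PySem.Int.lt_two_pow_bitLength x
  rw [mask_cast]
  by_cases h : 0 ≤ x
  · rw [PySem.Int.band, if_pos h, if_pos (by positivity)]
    have ht : x.toNat = x.natAbs := by omega
    have : x.toNat &&& ((2 ^ PySem.Int.bitLength x - 1 : Nat) : Int).toNat = x.toNat := by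
      rw [Int.toNat_natCast, Nat.and_two_pow_sub_one_eq_mod]
      exact Nat.mod_eq_of_lt (by omega)
    rw [this, vN, if_pos h]
  · rw [PySem.Int.band, if_neg h, if_pos (by positivity)]
    have hm1 : (-x - 1).toNat = x.natAbs - 1 := by omega
    have hmlt : x.natAbs - 1 < 2 ^ PySem.Int.bitLength x := by omega
    rw [Int.toNat_natCast, hm1, Nat.land_comm, Nat.and_two_pow_sub_one_eq_mod,
      Nat.mod_eq_of_lt hmlt, vN, if_neg h]
    congr 1
    omega

lemma compl_testBit : ∀ (i n m : Nat), i < n → m < 2 ^ n →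
    (2 ^ n - 1 - m).testBit i = !(m.testBit i) := by
  intro i
  induction i with
  | zero =>
    intro n m hi hm
    obtain ⟨n', rfl⟩ : ∃ n', n = n' + 1 := ⟨n - 1, by omega⟩
    have hK : 2 ^ (n' + 1) = 2 * 2 ^ n' := by ring
    simp only [Nat.testBit_zero]
    rcases Nat.mod_two_eq_zero_or_one m with h | h <;>
      · have : (2 ^ (n' + 1) - 1 - m) % 2 = 1 - m % 2 := by omega
        simp [this, h]
  | succ i ih =>
    intro n m hi hm
    obtain ⟨n', rfl⟩ : ∃ n', n = n' + 1 := ⟨n - 1, by omega⟩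
    have hK : 2 ^ (n' + 1) = 2 * 2 ^ n' := by ring
    rw [Nat.testBit_succ, Nat.testBit_succ]
    have hdiv : (2 ^ (n' + 1) - 1 - m) / 2 = 2 ^ n' - 1 - m / 2 := by omega
    rw [hdiv]
    exact ih n' (m / 2) (by omega) (by omega)

lemma band_bit (x : Int) (_hx : x ≠ 0) (i : Nat) (hi : i < PySem.Int.bitLength x) :
    (PySem.Int.band x ((1 : Int) <<< i) ≠ 0) ↔ (vN x).testBit i := by
  have hlt := PySem.Int.lt_two_pow_bitLength x
  rw [one_shiftLeft]
  by_cases h : 0 ≤ x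
  · rw [PySem.Int.band, if_pos h, if_pos (by positivity), Int.toNat_natCast]
    rw [vN, if_pos h]
    rw [Nat.and_two_pow]
    cases hb : x.toNat.testBit i <;> simp
  · rw [PySem.Int.band, if_neg h, if_pos (by positivity), Int.toNat_natCast]
    have hm1 : (-x - 1).toNat = x.natAbs - 1 := by omega
    have hmlt : x.natAbs - 1 < 2 ^ PySem.Int.bitLength x := by omega
    have hvn : vN x = 2 ^ PySem.Int.bitLength x - 1 - (x.natAbs - 1) := by
      rw [vN, if_neg h]; omega
    rw [hm1, Nat.two_pow_and, hvn, compl_testBit i _ _ hi hmlt]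
    cases hb : (x.natAbs - 1).testBit i
    · simp only [Bool.toNat_false, Nat.mul_zero, Nat.sub_zero, Bool.not_false, iff_true]
      exact_mod_cast (Nat.two_pow_pos i).ne'
    · simp

-- the witness A's loop tests bit i of x iff bit i of the window value is set
lemma fold_A_eq (x : Int) (hx : x ≠ 0) :
    (PySem.List.pyRange 0 (PySem.Int.bitLength x : Int)).foldl
      (fun (s : Int × Int) (i : Int) =>
        if PySem.Int.band x ((1 : Int) <<< i.toNat) ≠ 0 then
          (if s.2 > s.1 then s.2 else s.1, 0)
        else (s.1, s.2 + 1)) (0, 0) =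
    List.foldl stepC (0, 0) (padChars (PySem.Int.bitLength x) (vN x)) := by
  rw [PySem.List.pyRange_one]
  have : ((PySem.Int.bitLength x : Int) - 0).toNat = PySem.Int.bitLength x := by simp
  rw [this, List.foldl_map, padChars_eq_map, List.foldl_map]
  apply PySem.List.foldl_congr_mem
  intro s i hi
  have hilt : i < PySem.Int.bitLength x := List.mem_range.mp hi
  have htn : ((0 : Int) + (i : Int)).toNat = i := by simp
  rw [htn]
  by_cases hb : (vN x).testBit i
  · rw [if_pos ((band_bit x hx i hilt).mpr hb)]
    simp [stepC, hb]
  · rw [if_neg (fun hc => hb ((band_bit x hx i hilt).mp hc))]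
    simp [stepC, hb]

-- ===== VERDICT (by name: the statement is the Claim_ definition above) =====
theorem max_gap_spec : Claim_equal_max_gap := by
  intro x _
  unfold Spec_max_gap
  by_cases hx : x = 0
  · subst hx; decide
  · have hn := bitLength_pos x hx
    have hne : ¬ (PySem.Int.bitLength x = 0) := by omega
    obtain ⟨a, r, h⟩ : ∃ a r,
        split1 ((padChars (PySem.Int.bitLength x) (vN x)).reverse) = a :: r := by
      cases h : split1 ((padChars (PySem.Int.bitLength x) (vN x)).reverse) with
      | nil => exact absurd h (split1_ne_nil _)
      | cons a r => exact ⟨a, r, rfl⟩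
    have hbc : PySem.Int.toBinChars ((vN x : Nat) : Int) = binMSB (vN x) := by
      rw [PySem.Int.toBinChars, if_neg (not_lt.mpr (Int.natCast_nonneg _)), Int.toNat_natCast,
        toDigits_eq]
    have hB : max_gap_alt x =
        List.foldl max ((a.length : Int)) (r.map (fun q => (q.length : Int))) := by
      unfold max_gap_alt
      simp only []
      rw [if_neg hne, band_mask x hx, hbc, pad_binMSB _ _ (vN_lt x hx) hn, splitOn_eq, h]
      simp [PySem.List.max?_id_cons]
    have hA : max_gap x =
        (if ((lens ((padChars (PySem.Int.bitLength x) (vN x)).reverse)).headD 0) >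
            (List.foldl max 0 ((lens ((padChars (PySem.Int.bitLength x) (vN x)).reverse)).drop 1))
          then ((lens ((padChars (PySem.Int.bitLength x) (vN x)).reverse)).headD 0)
          else (List.foldl max 0 ((lens ((padChars (PySem.Int.bitLength x) (vN x)).reverse)).drop 1))) := by
      unfold max_gap
      simp only []
      conv_lhs => rw [fold_A_eq x hx,
        ← List.reverse_reverse (padChars (PySem.Int.bitLength x) (vN x)), fold_invariant]
    have hl : lens ((padChars (PySem.Int.bitLength x) (vN x)).reverse) =
        (a.length : Int) :: r.map (fun q => (q.length : Int)) := by
      simp [lens, h]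
    rw [hA, hB, hl]
    simp only [List.drop_one, List.tail_cons, List.headD_cons, if_gt_eq_max]
    rw [show ((a.length : Int)) = max ((a.length : Int)) 0
      from (max_eq_left (by positivity)).symm, foldl_max_max]
    rw [show max ((a.length : Int)) 0 = (a.length : Int) from max_eq_left (by positivity)]
    exact max_comm _ _
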